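-- pv_equiv track=rewrite | github.com/NadeemSamaali/LinearAlgebraSoftware | LinearSpace (Python Edition)/App.py | nPermutations
-- ===== SOURCE A (Python) =====
-- def nPermutations(I,F) :
--     k = 0
--     for i in range(len(I[0])) :
--         if I[i] != F[i] :
--             for j in range(i+1, len(I[0])) :
--                 if I[j] == F[i] :
--                     k += 1
--                     break
--     return k
-- ===== SOURCE B (Python) =====
-- def nPermutations(I, F):
--     # one backward pass: 'seen' holds the rows occurring after position i
--     n = len(I[0])
--     seen = set()
--     k = 0
--     for i in range(n - 1, -1, -1):
--         if I[i] != F[i] and tuple(F[i]) in seen: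
--             k += 1
--         seen.add(tuple(I[i]))
--     return k
-- ===== Notes on version B (the rewrite author's own statement) =====
-- stated objective: faster
-- what changed: Replaces the quadratic nested scan (for each mismatched i, rescan I[i+1:] for F[i]) by a single backward pass that maintains a hash set of the rows already seen after position i, so the inner scan disappears.
import Mathlib
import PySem

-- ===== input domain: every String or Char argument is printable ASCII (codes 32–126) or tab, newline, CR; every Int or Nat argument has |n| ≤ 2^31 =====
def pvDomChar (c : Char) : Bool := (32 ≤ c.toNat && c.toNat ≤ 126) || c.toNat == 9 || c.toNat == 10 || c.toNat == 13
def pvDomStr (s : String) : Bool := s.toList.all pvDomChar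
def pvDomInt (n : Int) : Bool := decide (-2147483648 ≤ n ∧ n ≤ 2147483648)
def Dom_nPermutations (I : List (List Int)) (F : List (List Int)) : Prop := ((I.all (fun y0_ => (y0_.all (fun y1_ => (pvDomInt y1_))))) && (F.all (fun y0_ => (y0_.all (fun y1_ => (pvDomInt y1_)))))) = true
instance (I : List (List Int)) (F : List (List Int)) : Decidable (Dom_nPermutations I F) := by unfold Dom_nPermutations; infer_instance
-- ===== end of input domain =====

-- B replaces A's quadratic nested rescan by one backward pass keeping a set of rows already seen (objective: faster).

-- ===== PORT A =====
def nPermutations (I : List (List Int)) (F : List (List Int)) : Int :=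
  let n : Int := ((PySem.List.pyGet? I 0).getD []).length
  (PySem.List.pyRange 0 n 1).foldl (fun k i =>
    let Ii := PySem.List.pyGetD I i []
    let Fi := PySem.List.pyGetD F i []
    if Ii ≠ Fi then
      -- inner 'for j … : if I[j] == F[i] : k += 1; break' = +1 iff some j matches
      if (PySem.List.pyRange (i + 1) n 1).any (fun j => PySem.List.pyGetD I j [] == Fi) then
        k + 1
      else k
    else k) 0

-- ===== PORT B =====
def nPermutations_alt (I : List (List Int)) (F : List (List Int)) : Int :=
  let n : Int := ((PySem.List.pyGet? I 0).getD []).length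
  let st := (PySem.List.pyRange (n - 1) (-1) (-1)).foldl
    (fun (st : Int × PySem.Set (List Int)) i =>
      let Ii := PySem.List.pyGetD I i []
      let Fi := PySem.List.pyGetD F i []
      let k := if Ii ≠ Fi ∧ PySem.Set.contains st.2 Fi = true then st.1 + 1 else st.1
      (k, PySem.Set.add st.2 Ii)) (0, PySem.Set.empty)
  st.1

-- ===== PRECONDITION & SPEC =====
-- Pre_ excludes exactly the inputs where Python A raises IndexError: I empty (I[0]),
-- or an index i < len(I[0]) out of range for I or F.
def Pre_nPermutations (I : List (List Int)) (F : List (List Int)) : Prop :=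
  I ≠ [] ∧ (I.headD []).length ≤ I.length ∧ (I.headD []).length ≤ F.length
instance (I : List (List Int)) (F : List (List Int)) : Decidable (Pre_nPermutations I F) := by
  unfold Pre_nPermutations; infer_instance

def pvWitness_nPermutations : List (List Int) × List (List Int) :=
  ([[1], [2]], [[2], [1]])

def Spec_nPermutations (I : List (List Int)) (F : List (List Int)) (out : Int) : Prop := out = nPermutations_alt I F
instance (I : List (List Int)) (F : List (List Int)) (out : Int) : Decidable (Spec_nPermutations I F out) := by unfold Spec_nPermutations; infer_instance

-- ===== CLAIM (what is proved, stated in full; the proofs are below) =====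
def Claim_equal_nPermutations : Prop := ∀ (I : List (List Int)) (F : List (List Int)), Dom_nPermutations I F → Pre_nPermutations I F → Spec_nPermutations I F (nPermutations I F)

-- ===== LEMMAS AND PROOFS =====

-- A's step is additive in the accumulator.
theorem pvFoldlA_add (g f : Int → List Int) (n : Int) (l : List Int) (k : Int) :
    l.foldl (fun k i =>
      if g i ≠ f i then
        if (PySem.List.pyRange (i + 1) n 1).any (fun j => g j == f i) then k + 1 else k
      else k) k
    = k + l.foldl (fun k i =>
      if g i ≠ f i then
        if (PySem.List.pyRange (i + 1) n 1).any (fun j => g j == f i) then k + 1 else k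
      else k) 0 := by
  induction l generalizing k with
  | nil => simp
  | cons x xs ih =>
    simp only [List.foldl_cons]
    rw [ih, ih (if g x ≠ f x then _ else _)]
    split_ifs <;> ring

-- Backward pass over [a, n): count equals A's forward fold, and the seen-set holds
-- exactly the rows g j for a ≤ j < n.
theorem pvB_invariant (g f : Int → List Int) (n : Int) :
    ∀ (m : Nat) (a : Int), (n - a).toNat = m →
    (List.foldr (fun i (st : Int × PySem.Set (List Int)) =>
        (if g i ≠ f i ∧ PySem.Set.contains st.2 (f i) = true then st.1 + 1 else st.1,
         PySem.Set.add st.2 (g i))) (0, PySem.Set.empty) (PySem.List.pyRange a n 1)).1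
      = (PySem.List.pyRange a n 1).foldl (fun k i =>
          if g i ≠ f i then
            if (PySem.List.pyRange (i + 1) n 1).any (fun j => g j == f i) then k + 1 else k
          else k) 0
    ∧ ∀ x, (x ∈ (List.foldr (fun i (st : Int × PySem.Set (List Int)) =>
        (if g i ≠ f i ∧ PySem.Set.contains st.2 (f i) = true then st.1 + 1 else st.1,
         PySem.Set.add st.2 (g i))) (0, PySem.Set.empty) (PySem.List.pyRange a n 1)).2
        ↔ ∃ j, a ≤ j ∧ j < n ∧ g j = x) := by
  intro m
  induction m with
  | zero =>
    intro a ha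
    have hna : n ≤ a := by omega
    rw [PySem.List.pyRange_one_eq_nil hna]
    constructor
    · simp
    · intro x
      simp only [List.foldr_nil]
      constructor
      · intro hx; exact absurd hx (by simp [PySem.Set.empty])
      · rintro ⟨j, h1, h2, _⟩; omega
  | succ m ih =>
    intro a ha
    have han : a < n := by omega
    have ih' := ih (a + 1) (by omega)
    rw [PySem.List.pyRange_one_cons han]
    simp only [List.foldr_cons, List.foldl_cons]
    obtain ⟨ih1, ih2⟩ := ih'
    constructor
    · -- count component
      rw [pvFoldlA_add]
      have hc : (PySem.Set.contains (List.foldr (fun i (st : Int × PySem.Set (List Int)) =>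
          (if g i ≠ f i ∧ PySem.Set.contains st.2 (f i) = true then st.1 + 1 else st.1,
           PySem.Set.add st.2 (g i))) (0, PySem.Set.empty) (PySem.List.pyRange (a + 1) n 1)).2 (f a) = true)
          ↔ ((PySem.List.pyRange (a + 1) n 1).any (fun j => g j == f a) = true) := by
        rw [PySem.Set.contains_iff, ih2, List.any_eq_true]
        constructor
        · rintro ⟨j, h1, h2, h3⟩
          exact ⟨j, by rw [PySem.List.mem_pyRange_one]; omega, by simp [h3]⟩
        · rintro ⟨j, hj, h3⟩
          rw [PySem.List.mem_pyRange_one] at hj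
          exact ⟨j, hj.1, hj.2, by simpa using h3⟩
      rw [ih1]
      by_cases hne : g a ≠ f a
      · by_cases hany : (PySem.List.pyRange (a + 1) n 1).any (fun j => g j == f a) = true
        · rw [if_pos ⟨hne, hc.mpr hany⟩, if_pos hne, if_pos hany]; ring
        · rw [if_neg (fun h => hany (hc.mp h.2)), if_pos hne, if_neg hany]; ring
      · rw [if_neg (fun h => hne h.1), if_neg hne]; ring
    · -- seen-set component
      intro x
      rw [PySem.Set.mem_add, ih2]
      constructor
      · rintro (⟨j, h1, h2, h3⟩ | h)
        · exact ⟨j, by omega, h2, h3⟩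
        · exact ⟨a, le_refl a, han, h.symm⟩
      · rintro ⟨j, h1, h2, h3⟩
        by_cases hja : j = a
        · exact Or.inr (by rw [← hja, h3])
        · exact Or.inl ⟨j, by omega, h2, h3⟩

-- ===== VERDICT (by name: the statement is the Claim_ definition above) =====
theorem nPermutations_spec : Claim_equal_nPermutations := by
  intro I F _ _
  unfold Spec_nPermutations nPermutations nPermutations_alt
  set n : Int := (((PySem.List.pyGet? I 0).getD []).length : Int) with hn
  have h0 : (0 : Int) ≤ n := by positivity
  have hrev : PySem.List.pyRange (n - 1) (-1) (-1) = (PySem.List.pyRange 0 n 1).reverse := by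
    have := PySem.List.pyRange_neg_one_eq_reverse (n - 1) (-1)
    simpa using this
  simp only [hrev, List.foldl_reverse]
  exact (pvB_invariant (fun i => PySem.List.pyGetD I i []) (fun i => PySem.List.pyGetD F i [])
    n n.toNat 0 (by omega)).1.symm
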